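-- pv_equiv track=rewrite | github.com/ptjahjadi/Phased-Out | bonus_play_strategy.py | check_group3
-- ===== SOURCE A (Python) =====
-- def check_group3(group):
--     """ This function checks the validity of group 3 in the combination
--     of cards. This function acts similar to Q1 with less considerations and
--     only focusing in group 3 validity.
--     """
--     if "ZZ" in group:
--         return False
--     else:
--         numberlist = []
--         num = 1
--         naturals = 0
--         for card in group:
--             if card[0] == "0":
--                 numberlist.append("10")
--             elif card[0] == "J":
--                 numberlist.append("11")
--             elif card[0] == "Q":
--                 numberlist.append("12")
--             elif card[0] == "K":
--                 numberlist.append("13")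
--             else:
--                 numberlist.append(card[0])
--         for natural_check in numberlist:
--             if natural_check != "A":
--                 naturals += 1
--         for natural_num in numberlist:
--             if natural_num != "A":
--                 first_num = natural_num
--                 break
--         for check_num in range(1, len(numberlist)):
--             try:
--                 if (first_num == numberlist[check_num] or
--                         numberlist[check_num] == "A"):
--                         num += 1
--             except UnboundLocalError:
--                 break
--         if num == 4 and naturals >= 2 and len(numberlist) == 4:
--             return True
--         else:
--             return False
-- ===== SOURCE B (Python) =====
-- def check_group3(group):
--     """ Validate group 3: exactly four cards, no joker ("ZZ"), at least two
--     non-Ace cards, and all non-Ace cards of the same rank (Aces are wild).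
--     Works directly on first characters: the rank table ('0'->"10", 'J'->"11",
--     'Q'->"12", 'K'->"13", else the character itself) is injective on first
--     characters and maps only 'A' to "A", so rank equality is first-character
--     equality. A single early-exit recursive scan keeps the reference rank and
--     the non-Ace count; no rank list is ever built."""
--     if "ZZ" in group or len(group) != 4:
--         return False
--
--     def scan(cards, ref, n):
--         if not cards:
--             return n >= 2
--         c = cards[0][0]
--         if c == 'A':
--             return scan(cards[1:], ref, n)
--         if ref is not None and c != ref:
--             return False
--         return scan(cards[1:], c, n + 1)
--
--     return scan(group, None, 0)
-- ===== Notes on version B (the rewrite author's own statement) =====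
-- stated objective: alternative
-- what changed: Drops the rank-mapping table and A's four list-building/counting loops: since the 0/J/Q/K table is injective on first characters, B validates raw first characters with a single early-exit recursive scan carrying the reference rank and non-Ace count; the up-front length check and rank-mismatch early exit avoid building any rank list.
import Mathlib
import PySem

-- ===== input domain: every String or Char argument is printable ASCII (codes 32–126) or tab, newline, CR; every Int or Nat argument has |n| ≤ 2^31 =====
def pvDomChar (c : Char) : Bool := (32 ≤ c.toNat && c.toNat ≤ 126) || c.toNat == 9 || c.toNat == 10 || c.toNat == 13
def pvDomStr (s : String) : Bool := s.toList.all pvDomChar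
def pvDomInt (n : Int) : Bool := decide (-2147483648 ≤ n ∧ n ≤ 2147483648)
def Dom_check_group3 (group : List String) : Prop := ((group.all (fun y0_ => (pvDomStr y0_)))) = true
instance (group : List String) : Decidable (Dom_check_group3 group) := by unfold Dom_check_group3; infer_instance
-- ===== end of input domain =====

-- B drops A's rank table and its four list-building/counting loops: the 0/J/Q/K mapping is
-- injective on first characters, so B validates raw first characters with one early-exit
-- recursive scan carrying the reference rank and non-Ace count (objective: alternative).

-- ===== PORT A =====
-- card[0] is total under Pre_ (cards are nonempty unless "ZZ" short-circuits); headD's default is never reached there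
def check_group3 (group : List String) : Bool :=
  if "ZZ" ∈ group then false
  else
    let numberlist := group.foldl (fun acc card =>
      let c := card.toList.headD ' '
      if c = '0' then acc ++ ["10"]
      else if c = 'J' then acc ++ ["11"]
      else if c = 'Q' then acc ++ ["12"]
      else if c = 'K' then acc ++ ["13"]
      else acc ++ [String.ofList [c]]) []
    let naturals : Int := numberlist.foldl (fun n x => if x ≠ "A" then n + 1 else n) 0
    let first_num := numberlist.find? (fun x => x ≠ "A")
    let num : Int := (PySem.List.pyRange 1 (numberlist.length : Int) 1).foldl (fun num i =>
      match first_num with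
      | none => num
      | some f => if f = PySem.List.pyGetD numberlist i "" ∨ PySem.List.pyGetD numberlist i "" = "A"
                  then num + 1 else num) 1
    decide (num = 4 ∧ 2 ≤ naturals ∧ numberlist.length = 4)

-- ===== PORT B =====
-- B's recursive helper scan(cards, ref, n): ref = reference non-Ace first character seen so far
def g3Scan : List String → Option Char → Nat → Bool
  | [], _, n => decide (2 ≤ n)
  | card :: rest, ref, n =>
    let c := card.toList.headD ' '
    if c = 'A' then g3Scan rest ref n
    else if ref.any (fun r => c ≠ r) then false
    else g3Scan rest (some c) (n + 1)

def check_group3_alt (group : List String) : Bool :=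
  if "ZZ" ∈ group ∨ group.length ≠ 4 then false
  else g3Scan group none 0

-- ===== PRECONDITION & SPEC =====
-- Pre_ excludes groups containing an empty card string (and no "ZZ" joker): there A raises IndexError on card[0].
def Pre_check_group3 (group : List String) : Prop :=
  "ZZ" ∈ group ∨ ∀ c ∈ group, c ≠ ""
instance (group : List String) : Decidable (Pre_check_group3 group) := by unfold Pre_check_group3; infer_instance

def pvWitness_check_group3 : List String := ["3H", "3S", "AD", "3C"]

def Spec_check_group3 (group : List String) (out : Bool) : Prop := out = check_group3_alt group
instance (group : List String) (out : Bool) : Decidable (Spec_check_group3 group out) := by unfold Spec_check_group3; infer_instance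

-- ===== CLAIM (what is proved, stated in full; the proofs are below) =====
def Claim_equal_check_group3 : Prop := ∀ (group : List String), Dom_check_group3 group → Pre_check_group3 group → Spec_check_group3 group (check_group3 group)

-- ===== LEMMAS AND PROOFS =====
-- first character (as both Pythons read card[0]; default unreachable under Pre_)
def hd0 (s : String) : Char := s.toList.headD ' '
-- A's rank table as a function of the first character
def rnkC (c : Char) : String :=
  if c = '0' then "10" else if c = 'J' then "11" else if c = 'Q' then "12"
  else if c = 'K' then "13" else String.ofList [c]
def rnk (card : String) : String := rnkC (hd0 card)
-- char-level filtered list of non-Ace first characters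
def nonA (cards : List String) : List Char := (cards.map hd0).filter (fun c => c ≠ 'A')
-- the common characterization both ports are reduced to (string-rank level)
def PhiS (n : Nat) (l : List String) : Prop :=
  n = 4 ∧ 2 ≤ (l.filter (fun s => s ≠ "A")).length ∧
    ∀ x ∈ l.filter (fun s => s ≠ "A"), ∀ y ∈ l.filter (fun s => s ≠ "A"), x = y

theorem ofList_single_inj (d e : Char) : (String.ofList [d] = String.ofList [e]) ↔ d = e := by
  constructor
  · intro h; have := congrArg String.toList h; simpa using this
  · intro h; rw [h]

theorem single_ne_two (d : Char) (s : String) (h : s.toList.length = 2) :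
    String.ofList [d] ≠ s := by
  intro e
  have := congrArg (fun t => t.toList.length) e
  simp [h] at this

theorem rnkC_inj (c d : Char) : rnkC c = rnkC d ↔ c = d := by
  unfold rnkC
  split_ifs <;>
    constructor <;>
      intro h <;>
        first
          | rfl
          | exact (ofList_single_inj _ _).mp h
          | exact absurd h (by decide)
          | exact absurd h (single_ne_two _ _ (by decide))
          | exact absurd h.symm (single_ne_two _ _ (by decide))
          | (subst_vars; simp_all)

theorem rnkC_A (c : Char) : rnkC c = "A" ↔ c = 'A' := by
  unfold rnkC
  split_ifs <;>
    first
      | (constructor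
         · intro h; exact absurd h (by decide)
         · intro h; subst_vars; simp_all)
      | (have hA : ("A" : String) = String.ofList ['A'] := by decide
         rw [hA, ofList_single_inj])

theorem filter_map_rnk (cards : List String) :
    (cards.map rnk).filter (fun s => decide (s ≠ "A")) = (nonA cards).map rnkC := by
  induction cards with
  | nil => rfl
  | cons card rest ih =>
    have hrA : (rnk card = "A") ↔ (hd0 card = 'A') := rnkC_A _
    unfold nonA at *
    simp only [List.map_cons]
    by_cases hA : hd0 card = 'A'
    · rw [List.filter_cons_of_neg (by simp [hrA, hA]),
          List.filter_cons_of_neg (by simp [hA]), ih]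
    · rw [List.filter_cons_of_pos (by simp [hrA, hA]),
          List.filter_cons_of_pos (by simp [hA]), List.map_cons, ih]
      rfl

theorem allEq_map_rnkC (L : List Char) :
    (∀ x ∈ L.map rnkC, ∀ y ∈ L.map rnkC, x = y) ↔ (∀ x ∈ L, ∀ y ∈ L, x = y) := by
  constructor
  · intro h x hx y hy
    exact (rnkC_inj x y).mp (h _ (List.mem_map_of_mem hx) _ (List.mem_map_of_mem hy))
  · intro h x hx y hy
    rw [List.mem_map] at hx hy
    obtain ⟨a, ha, rfl⟩ := hx; obtain ⟨b, hb, rfl⟩ := hy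
    exact (rnkC_inj a b).mpr (h a ha b hb)

-- ===== A reduces to PhiS =====
theorem A_char (group : List String) (hz : "ZZ" ∉ group) :
    check_group3 group = true ↔ PhiS group.length (group.map rnk) := by
  unfold check_group3 PhiS
  simp only [if_neg hz]
  have hfold : (group.foldl (fun acc card =>
      let c := card.toList.headD ' '
      if c = '0' then acc ++ ["10"]
      else if c = 'J' then acc ++ ["11"]
      else if c = 'Q' then acc ++ ["12"]
      else if c = 'K' then acc ++ ["13"]
      else acc ++ [String.ofList [c]]) []) = group.map rnk := by
    have he : (fun (acc : List String) card =>
        let c := card.toList.headD ' '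
        if c = '0' then acc ++ ["10"]
        else if c = 'J' then acc ++ ["11"]
        else if c = 'Q' then acc ++ ["12"]
        else if c = 'K' then acc ++ ["13"]
        else acc ++ [String.ofList [c]]) = (fun acc card => acc ++ [rnk card]) := by
      funext acc card
      simp only [rnk, rnkC, hd0]
      split_ifs <;> rfl
    rw [he, PySem.List.foldl_append_singleton_eq_map]; rfl
  rw [hfold]
  set l := group.map rnk with hl
  have hlen : l.length = group.length := by rw [hl]; exact List.length_map ..
  rw [PySem.List.foldl_ite_add_one, decide_eq_true_eq]
  by_cases h4 : group.length = 4
  · have hl4 : l.length = 4 := by omega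
    match l, hl4 with
    | [a,b,c,d], _ =>
    clear hfold hl hlen hl4
    have hlen' : (([a,b,c,d].length : Nat) : Int) = (4 : Int) := by simp
    have hrg : PySem.List.pyRange 1 (4 : Int) 1 = [1, 2, 3] := by decide
    rw [hlen', hrg]
    have e1 : PySem.List.pyGetD [a,b,c,d] (1 : Int) "" = b := by
      simp [PySem.List.pyGetD, PySem.List.pyGet?, PySem.List.pyIdx?]
    have e2 : PySem.List.pyGetD [a,b,c,d] (2 : Int) "" = c := by
      simp [PySem.List.pyGetD, PySem.List.pyGet?, PySem.List.pyIdx?]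
    have e3 : PySem.List.pyGetD [a,b,c,d] (3 : Int) "" = d := by
      simp [PySem.List.pyGetD, PySem.List.pyGet?, PySem.List.pyIdx?]
    rcases hfd : List.find? (fun x => decide (x ≠ "A")) [a, b, c, d] with _ | f <;>
      simp only [List.foldl_cons, List.foldl_nil, e1, e2, e3]
    · -- all four ranks are "A": both sides are false
      rw [List.find?_eq_none] at hfd
      have ha := hfd a (by simp); have hb := hfd b (by simp)
      have hc := hfd c (by simp); have hd := hfd d (by simp)
      simp at ha hb hc hd
      simp [ha, hb, hc, hd, h4]
    · have hfA : f ≠ "A" := by have := List.find?_some hfd; simpa using this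
      have hfmem : f ∈ [a, b, c, d] := List.mem_of_find?_eq_some hfd
      have hhead : a ≠ "A" → f = a := by
        intro h; rw [List.find?_cons_of_pos (by simpa using h)] at hfd
        exact (Option.some_inj.mp hfd).symm
      have hcnt0 : List.countP (fun x => decide (x ≠ "A")) [a, b, c, d] =
          (List.filter (fun r => decide (r ≠ "A")) [a, b, c, d]).length :=
        List.countP_eq_length_filter
      constructor
      · rintro ⟨hnum, hc2, -⟩
        refine ⟨h4, ?_, ?_⟩
        · rw [hcnt0] at hc2; exact_mod_cast (by omega : (2 : Int) ≤ ↑(List.filter (fun r => decide (r ≠ "A")) [a, b, c, d]).length)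
        · have hb' : f = b ∨ b = "A" := by
            by_contra h; push_neg at h; simp only [h.1, h.2, or_self, if_false] at hnum
            split_ifs at hnum <;> omega
          have hc' : f = c ∨ c = "A" := by
            by_contra h; push_neg at h; simp only [h.1, h.2, or_self, if_false] at hnum
            split_ifs at hnum <;> omega
          have hd' : f = d ∨ d = "A" := by
            by_contra h; push_neg at h; simp only [h.1, h.2, or_self, if_false] at hnum
            split_ifs at hnum <;> omega
          have hall : ∀ z ∈ List.filter (fun r => decide (r ≠ "A")) [a, b, c, d], z = f := by
            intro z hz
            rw [List.mem_filter] at hz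
            obtain ⟨hzm, hzA⟩ := hz
            simp only [decide_eq_true_eq] at hzA
            simp only [List.mem_cons, List.not_mem_nil, or_false] at hzm
            rcases hzm with h | h | h | h
            · subst h; exact (hhead hzA).symm
            · subst h; exact (hb'.resolve_right hzA).symm
            · subst h; exact (hc'.resolve_right hzA).symm
            · subst h; exact (hd'.resolve_right hzA).symm
          intro x hx y hy
          rw [hall x hx, hall y hy]
      · rintro ⟨-, hc2, hall⟩
        have hfin : f ∈ List.filter (fun r => decide (r ≠ "A")) [a, b, c, d] := by
          rw [List.mem_filter]; exact ⟨hfmem, by simpa using hfA⟩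
        have key : ∀ z, z ∈ [a, b, c, d] → (f = z ∨ z = "A") := by
          intro z hz
          by_cases hA : z = "A"
          · exact Or.inr hA
          · refine Or.inl ?_
            have hzin : z ∈ List.filter (fun r => decide (r ≠ "A")) [a, b, c, d] := by
              rw [List.mem_filter]; exact ⟨hz, by simpa using hA⟩
            exact (hall z hzin f hfin).symm
        refine ⟨?_, ?_, by omega⟩
        · rw [if_pos (key b (by simp)), if_pos (key c (by simp)), if_pos (key d (by simp))]
          norm_num
        · rw [hcnt0]
          have : (2 : Nat) ≤ (List.filter (fun r => decide (r ≠ "A")) [a, b, c, d]).length := hc2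
          omega
  · have h4' : ¬ l.length = 4 := by omega
    simp [h4, h4']

-- ===== B reduces to PhiS =====
theorem scan_spec (cards : List String) (ref : Option Char) (n : Nat) :
    g3Scan cards ref n = true ↔
      ((∀ x ∈ nonA cards, ∀ y ∈ nonA cards, x = y) ∧
       (∀ r, ref = some r → ∀ x ∈ nonA cards, x = r) ∧
       2 ≤ n + (nonA cards).length) := by
  induction cards generalizing ref n with
  | nil =>
    simp [g3Scan, nonA]
  | cons card rest ih =>
    have hsc : g3Scan (card :: rest) ref n =
        (if hd0 card = 'A' then g3Scan rest ref n
         else if ref.any (fun r => hd0 card ≠ r) then false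
         else g3Scan rest (some (hd0 card)) (n + 1)) := rfl
    rw [hsc]
    by_cases hA : hd0 card = 'A'
    · have hrw : nonA (card :: rest) = nonA rest := by
        unfold nonA; simp [hA, List.filter_cons]
      rw [if_pos hA, hrw]
      exact ih ref n
    · have hrw : nonA (card :: rest) = hd0 card :: nonA rest := by
        unfold nonA; simp [hA, List.filter_cons]
      rw [if_neg hA, hrw]
      by_cases hbad : ref.any (fun r => hd0 card ≠ r) = true
      · rw [if_pos hbad]
        have hex : ∃ r, ref = some r ∧ hd0 card ≠ r := by
          rcases ref with _ | r
          · simp [Option.any] at hbad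
          · refine ⟨r, rfl, ?_⟩
            simpa [Option.any] using hbad
        obtain ⟨r, hr, hne⟩ := hex
        constructor
        · intro h; exact absurd h (by simp)
        · rintro ⟨-, h2, -⟩
          exact (hne (h2 r hr (hd0 card) (List.mem_cons_self ..))).elim
      · rw [if_neg hbad, ih (some (hd0 card)) (n + 1)]
        have hrefall : ∀ r, ref = some r → hd0 card = r := by
          intro r hr
          by_contra hne
          exact hbad (by simp [hr, hne])
        constructor
        · rintro ⟨h1, h2, h3⟩
          have hx : ∀ x ∈ nonA rest, x = hd0 card := h2 _ rfl
          refine ⟨?_, ?_, ?_⟩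
          · intro x hx' y hy'
            simp only [List.mem_cons] at hx' hy'
            rcases hx' with rfl | hx' <;> rcases hy' with rfl | hy'
            · rfl
            · exact (hx y hy').symm
            · exact hx x hx'
            · exact h1 x hx' y hy'
          · intro r hr x hxm
            simp only [List.mem_cons] at hxm
            rcases hxm with rfl | hxm
            · exact hrefall r hr
            · exact (hx x hxm).trans (hrefall r hr)
          · simp only [List.length_cons]; omega
        · rintro ⟨h1, _, h3⟩
          have hx : ∀ x ∈ nonA rest, x = hd0 card := by
            intro x hxm
            exact h1 x (List.mem_cons_of_mem _ hxm) (hd0 card) (List.mem_cons_self ..)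
          refine ⟨?_, ?_, ?_⟩
          · intro x hx' y hy'
            rw [hx x hx', hx y hy']
          · intro r hr x hxm
            rw [← Option.some_inj.mp hr]; exact hx x hxm
          · simp only [List.length_cons] at h3; omega

theorem B_char (group : List String) (hz : "ZZ" ∉ group) :
    check_group3_alt group = true ↔ PhiS group.length (group.map rnk) := by
  unfold check_group3_alt
  by_cases h4 : group.length = 4
  · rw [if_neg (by simp [hz, h4]), scan_spec group none 0]
    unfold PhiS
    rw [show ((group.map rnk).filter (fun s => decide (s ≠ "A")) = (nonA group).map rnkC)
          from filter_map_rnk group]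
    rw [List.length_map, allEq_map_rnkC]
    constructor
    · rintro ⟨h1, -, h3⟩; exact ⟨h4, by omega, h1⟩
    · rintro ⟨-, h2, h1⟩
      refine ⟨h1, ?_, by omega⟩
      intro r hr
      exact absurd hr (by simp)
  · rw [if_pos (by simp [h4])]
    unfold PhiS
    simp [h4]

-- ===== VERDICT (by name: the statement is the Claim_ definition above) =====
theorem check_group3_spec : Claim_equal_check_group3 := by
  intro group _ _
  unfold Spec_check_group3
  by_cases hz : "ZZ" ∈ group
  · unfold check_group3 check_group3_alt
    simp [hz]
  · have h1 := A_char group hz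
    have h2 := B_char group hz
    cases hA : check_group3 group <;> cases hB : check_group3_alt group <;> simp_all
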